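-- pv_equiv track=rewrite | github.com/VernaculusF/pdf-estimate-to-excel | project/extractor.py | _merge_header_rows
-- ===== SOURCE A (Python) =====
-- from typing import List, Optional, Dict, Any, Tuple
--
-- def _merge_header_rows(header_rows: List[List[Any]], num_cols: int) -> List[str]:
--     columns = [""] * num_cols
--     for row in header_rows:
--         for i, cell in enumerate(row[:num_cols]):
--             cell = str(cell).strip() if cell is not None else ""
--             if not cell:
--                 continue
--             if cell in columns[i]:
--                 continue
--             if columns[i]:
--                 columns[i] += " " + cell
--             else:
--                 columns[i] = cell
--     for i in range(num_cols):
--         if not columns[i]: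
--             columns[i] = f"Column_{i + 1}"
--     return columns
-- ===== SOURCE B (Python) =====
-- def _merge_header_rows(header_rows, num_cols):
--     def reduce_column(cells):
--         merged = ""
--         for cell in cells:
--             c = str(cell).strip() if cell is not None else ""
--             if not c or c in merged:
--                 continue
--             merged = merged + " " + c if merged else c
--         return merged
--     col_cells = [[] for _ in range(num_cols)]
--     for row in header_rows:
--         for i, cell in enumerate(row[:num_cols]):
--             col_cells[i].append(cell)
--     out = []
--     for i, cells in enumerate(col_cells):
--         merged = reduce_column(cells)
--         out.append(merged if merged else f"Column_{i + 1}")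
--     return out
-- ===== Notes on version B (the rewrite author's own statement) =====
-- stated objective: alternative
-- what changed: Row-major in-place merging into a shared columns array of strings is replaced by a transpose-then-reduce pass: the cells are first bucketed per column index, then each bucket is folded independently by a reduce_column helper into one merged name.
-- outside the precondition, e.g. on _merge_header_rows([[' ', 'x']], -1): A returns [], B raises IndexError
import Mathlib
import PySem

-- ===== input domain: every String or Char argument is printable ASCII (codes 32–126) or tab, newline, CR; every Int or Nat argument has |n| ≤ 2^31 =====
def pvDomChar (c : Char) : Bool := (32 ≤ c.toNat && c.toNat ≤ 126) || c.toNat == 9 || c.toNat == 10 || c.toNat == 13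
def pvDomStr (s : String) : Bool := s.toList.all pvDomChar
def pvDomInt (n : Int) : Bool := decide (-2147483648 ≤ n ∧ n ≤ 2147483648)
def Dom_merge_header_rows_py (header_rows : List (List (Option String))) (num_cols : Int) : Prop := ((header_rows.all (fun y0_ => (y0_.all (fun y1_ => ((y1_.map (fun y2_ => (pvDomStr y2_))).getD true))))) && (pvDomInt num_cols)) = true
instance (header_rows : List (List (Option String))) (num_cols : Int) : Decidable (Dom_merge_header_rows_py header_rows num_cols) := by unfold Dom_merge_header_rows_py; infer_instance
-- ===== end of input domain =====

-- B replaces A's row-major mutation of a shared columns array by an independent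
-- column-major pass (gather each column's cells, fold them with pvStep); same cost.

-- ===== PORT A =====
def merge_header_rows_py (header_rows : List (List (Option String))) (num_cols : Int) : List String :=
  let columns : List String := List.replicate num_cols.toNat ""
  let columns := header_rows.foldl (fun cols row =>
    (PySem.List.enumerate (PySem.List.slice row none (some num_cols)) 0).foldl
      (fun cols p =>
        let cell : String := match p.2 with
          | none => ""
          | some s => PySem.Str.strip s
        if cell = "" then cols
        else if PySem.Str.isIn cell (PySem.List.pyGetD cols p.1 "") = true then cols
        else if ¬ (PySem.List.pyGetD cols p.1 "" = "") then
          PySem.List.pySetD cols p.1 (PySem.List.pyGetD cols p.1 "" ++ " " ++ cell)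
        else PySem.List.pySetD cols p.1 cell)
      cols) columns
  (PySem.List.pyRange 0 num_cols 1).foldl
    (fun cols i =>
      if PySem.List.pyGetD cols i "" = "" then
        PySem.List.pySetD cols i ("Column_" ++ PySem.Int.toStr (i + 1))
      else cols) columns

-- ===== PORT B =====
-- the body of B's reduce_column loop
def pvStep (merged : String) (cell : Option String) : String :=
  let c : String := match cell with
    | none => ""
    | some s => PySem.Str.strip s
  if c = "" ∨ PySem.Str.isIn c merged = true then merged
  else if merged = "" then c else merged ++ " " ++ c

def pvReduceColumn (cells : List (Option String)) : String :=
  cells.foldl pvStep ""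

-- col_cells[i].append(cell) is ported by hand as a functional update at index i
-- (exact: a Python list of lists with in-place append of one element)
def merge_header_rows_py_alt (header_rows : List (List (Option String))) (num_cols : Int) : List String :=
  let col_cells : List (List (Option String)) :=
    (PySem.List.pyRange 0 num_cols 1).map (fun _ => ([] : List (Option String)))
  let col_cells := header_rows.foldl (fun st row =>
    (PySem.List.enumerate (PySem.List.slice row none (some num_cols)) 0).foldl
      (fun st p => PySem.List.pySetD st p.1 (PySem.List.pyGetD st p.1 [] ++ [p.2])) st) col_cells
  (PySem.List.enumerate col_cells 0).map (fun p =>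
    let merged := pvReduceColumn p.2
    if merged = "" then "Column_" ++ PySem.Int.toStr (p.1 + 1) else merged)

-- ===== PRECONDITION & SPEC =====
-- Pre_ keeps the natural domain 0 <= num_cols plus the negative inputs on which both
-- programs still return (every row[:num_cols] empty, both return []); it excludes the
-- remaining num_cols < 0 inputs, where A indexes the empty columns list and raises
-- IndexError on any non-blank sliced cell (and returns [] when all sliced cells are
-- blank) while B's bucket pass raises on any sliced cell at all.
def Pre_merge_header_rows_py (header_rows : List (List (Option String))) (num_cols : Int) : Prop :=
  0 ≤ num_cols ∨
    header_rows.all (fun row => (PySem.List.slice row none (some num_cols)).isEmpty) = true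
instance (header_rows : List (List (Option String))) (num_cols : Int) : Decidable (Pre_merge_header_rows_py header_rows num_cols) := by unfold Pre_merge_header_rows_py; infer_instance

def pvWitness_merge_header_rows_py : List (List (Option String)) × Int :=
  ([[some "Total", none], [some "Qty", some "Total Qty"]], 2)

def Spec_merge_header_rows_py (header_rows : List (List (Option String))) (num_cols : Int) (out : List String) : Prop := out = merge_header_rows_py_alt header_rows num_cols
instance (header_rows : List (List (Option String))) (num_cols : Int) (out : List String) : Decidable (Spec_merge_header_rows_py header_rows num_cols out) := by unfold Spec_merge_header_rows_py; infer_instance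

-- ===== CLAIM (what is proved, stated in full; the proofs are below) =====
def Claim_equal_merge_header_rows_py : Prop := ∀ (header_rows : List (List (Option String))) (num_cols : Int), Dom_merge_header_rows_py header_rows num_cols → Pre_merge_header_rows_py header_rows num_cols → Spec_merge_header_rows_py header_rows num_cols (merge_header_rows_py header_rows num_cols)

-- ===== LEMMAS AND PROOFS =====

-- named forms of A's three loop bodies (definitionally the port's lambdas)
def pvInnerA (cols : List String) (p : Int × Option String) : List String :=
  let cell : String := match p.2 with
    | none => ""
    | some s => PySem.Str.strip s
  if cell = "" then cols
  else if PySem.Str.isIn cell (PySem.List.pyGetD cols p.1 "") = true then cols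
  else if ¬ (PySem.List.pyGetD cols p.1 "" = "") then
    PySem.List.pySetD cols p.1 (PySem.List.pyGetD cols p.1 "" ++ " " ++ cell)
  else PySem.List.pySetD cols p.1 cell

def pvRowA (num_cols : Int) (cols : List String) (row : List (Option String)) : List String :=
  (PySem.List.enumerate (PySem.List.slice row none (some num_cols)) 0).foldl pvInnerA cols

def pvFinA (cols : List String) (i : Int) : List String :=
  if PySem.List.pyGetD cols i "" = "" then
    PySem.List.pySetD cols i ("Column_" ++ PySem.Int.toStr (i + 1))
  else cols

lemma pvA_eq (hr : List (List (Option String))) (nc : Int) :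
    merge_header_rows_py hr nc =
      (PySem.List.pyRange 0 nc 1).foldl pvFinA
        (hr.foldl (pvRowA nc) (List.replicate nc.toNat "")) := rfl

-- named forms of B's two gather loop bodies (definitionally the port's lambdas)
def pvInnerB (st : List (List (Option String))) (p : Int × Option String) :
    List (List (Option String)) :=
  PySem.List.pySetD st p.1 (PySem.List.pyGetD st p.1 [] ++ [p.2])

def pvRowB (num_cols : Int) (st : List (List (Option String))) (row : List (Option String)) :
    List (List (Option String)) :=
  (PySem.List.enumerate (PySem.List.slice row none (some num_cols)) 0).foldl pvInnerB st

lemma pvB_eq (hr : List (List (Option String))) (nc : Int) :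
    merge_header_rows_py_alt hr nc =
      (PySem.List.enumerate
        (hr.foldl (pvRowB nc) ((PySem.List.pyRange 0 nc 1).map (fun _ => []))) 0).map
        (fun p =>
          let merged := pvReduceColumn p.2
          if merged = "" then "Column_" ++ PySem.Int.toStr (p.1 + 1) else merged) := rfl

lemma pv_set_getD_self {α : Type} (l : List α) (k : Nat) (d : α) (h : k < l.length) :
    l.set k (l.getD k d) = l := by
  apply List.ext_getElem (by simp)
  intro i h1 h2
  simp [List.getElem_set]
  intro hik; subst hik
  simp [List.getD_eq_getElem?_getD, List.getElem?_eq_getElem h]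

lemma pvInnerA_set (cols : List String) (k : Nat) (hk : k < cols.length) (cell : Option String) :
    pvInnerA cols ((k : Int), cell) = cols.set k (pvStep (cols.getD k "") cell) := by
  simp only [pvInnerA, pvStep, PySem.List.pyGetD_natCast, PySem.List.pySetD_natCast]
  split_ifs with h1 h2 h3 h4 h5 <;> simp_all [pv_set_getD_self cols k "" hk]

lemma pvInnerB_set (st : List (List (Option String))) (k : Nat) (hk : k < st.length)
    (cell : Option String) :
    pvInnerB st ((k : Int), cell) = st.set k (st.getD k [] ++ [cell]) := by
  simp only [pvInnerB, PySem.List.pyGetD_natCast, PySem.List.pySetD_natCast]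

-- both inner loops are 'update index i with the cell at index i': one generic fold shape
lemma pv_enum_fold {α : Type} (g : List α → Int × Option String → List α)
    (f : α → Option String → α) (d : α)
    (hg : ∀ (st : List α) (k : Nat) (c : Option String), k < st.length →
      g st ((k : Int), c) = st.set k (f (st.getD k d) c))
    (cells : List (Option String)) :
    ∀ (s : Nat) (st : List α), s + cells.length ≤ st.length →
    (PySem.List.enumerate cells (s : Int)).foldl g st =
      st.take s ++ List.zipWith f (st.drop s) cells ++ st.drop (s + cells.length) := by
  induction cells with
  | nil => intro s st h; simp [PySem.List.enumerate_nil]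
  | cons c cs ih =>
    intro s st h
    have hlen : s + cs.length + 1 ≤ st.length := by simp at h; omega
    have hs : s < st.length := by omega
    rw [PySem.List.enumerate_cons, List.foldl_cons]
    have hc : ((s:Int) + 1) = ((s+1 : Nat) : Int) := by push_cast; ring
    rw [hg st s c hs, hc, ih (s+1) _ (by simp; omega)]
    set v := f (st.getD s d) c with hv
    have hset : st.set s v = st.take s ++ v :: st.drop (s+1) := by
      rw [List.set_eq_take_append_cons_drop, if_pos hs]
    rw [hset]
    have hts : (st.take s).length = s := by simp; omega
    have l1 : (st.take s ++ v :: st.drop (s+1)).take (s+1) = st.take s ++ [v] := by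
      rw [List.take_append, hts]
      simp
    have l2 : (st.take s ++ v :: st.drop (s+1)).drop (s+1) = st.drop (s+1) := by
      rw [List.drop_append, hts]
      simp
    have l3 : (st.take s ++ v :: st.drop (s+1)).drop (s+1+cs.length) = st.drop (s+1+cs.length) := by
      rw [List.drop_append, hts, List.drop_eq_nil_of_le (by rw [hts]; omega)]
      have h1 : s+1+cs.length - s = cs.length + 1 := by omega
      rw [h1, List.drop_succ_cons, List.drop_drop]
      simp
    have l4 : st.drop s = st.getD s d :: st.drop (s+1) := by
      rw [List.drop_eq_getElem_cons hs]
      simp [List.getD_eq_getElem?_getD, List.getElem?_eq_getElem hs]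
    rw [l1, l2, l3, l4, List.zipWith_cons_cons]
    have h3 : s + (c :: cs).length = s + 1 + cs.length := by simp; omega
    rw [h3]
    simp [hv, List.getD]

lemma pvRowA_char (nc : Int) (h0 : 0 ≤ nc) (cols : List String) (row : List (Option String))
    (hlen : cols.length = nc.toNat) :
    pvRowA nc cols row =
      List.zipWith pvStep cols (row.take nc.toNat) ++ cols.drop (row.take nc.toNat).length := by
  unfold pvRowA
  rw [PySem.List.slice_to row h0]
  have h := pv_enum_fold pvInnerA pvStep "" (fun st k c hk => pvInnerA_set st k hk c) (row.take nc.toNat) 0 cols (by simp; omega)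
  simpa using h

lemma pvRowB_char (nc : Int) (h0 : 0 ≤ nc) (st : List (List (Option String)))
    (row : List (Option String)) (hlen : st.length = nc.toNat) :
    pvRowB nc st row =
      List.zipWith (fun b c => b ++ [c]) st (row.take nc.toNat) ++
        st.drop (row.take nc.toNat).length := by
  unfold pvRowB
  rw [PySem.List.slice_to row h0]
  have h := pv_enum_fold pvInnerB (fun b c => b ++ [c]) [] (fun st k c hk => pvInnerB_set st k hk c) (row.take nc.toNat) 0 st
    (by simp; omega)
  simpa using h

lemma pvRowA_length (nc : Int) (h0 : 0 ≤ nc) (cols : List String) (row : List (Option String))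
    (hlen : cols.length = nc.toNat) : (pvRowA nc cols row).length = cols.length := by
  rw [pvRowA_char nc h0 cols row hlen]
  simp
  omega

lemma pvRowB_length (nc : Int) (h0 : 0 ≤ nc) (st : List (List (Option String)))
    (row : List (Option String)) (hlen : st.length = nc.toNat) :
    (pvRowB nc st row).length = st.length := by
  rw [pvRowB_char nc h0 st row hlen]
  simp
  omega

-- the cells of column i, in row order (what B's gather pass collects per bucket)
def pvColCells (rows : List (List (Option String))) (i : Nat) : List (Option String) :=
  (rows.filter (fun row => (i : Int) < PySem.List.len row)).map
    (fun row => PySem.List.pyGetD row (i : Int) none)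

lemma pv_row_elem {α : Type} (f : α → Option String → α) (d : α) (nc : Int) (h0 : 0 ≤ nc)
    (i : Nat) (hi : i < nc.toNat) (st : List α) (row : List (Option String))
    (hlen : st.length = nc.toNat) :
    (List.zipWith f st (row.take nc.toNat) ++ st.drop (row.take nc.toNat).length).getD i d =
      if (i : Int) < PySem.List.len row then f (st.getD i d) (PySem.List.pyGetD row (i : Int) none)
      else st.getD i d := by
  have hi' : i < st.length := by omega
  by_cases hr : i < row.length
  · have hcl : i < (row.take nc.toNat).length := by simp; omega
    have hz : i < (List.zipWith f st (row.take nc.toNat)).length := by simp; omega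
    rw [List.getD_eq_getElem?_getD, List.getElem?_append_left hz, List.getElem?_eq_getElem hz]
    rw [List.getElem_zipWith]
    simp [PySem.List.len_eq, hr, List.getD_eq_getElem?_getD, List.getElem?_eq_getElem hi',
      List.getElem?_eq_getElem hr, PySem.List.pyGetD_natCast]
  · have hmin : (row.take nc.toNat).length = row.length := by simp; omega
    have hz : (List.zipWith f st (row.take nc.toNat)).length = row.length := by simp; omega
    rw [List.getD_eq_getElem?_getD, List.getElem?_append_right (by omega)]
    rw [hz, hmin, List.getElem?_drop]
    have : row.length + (i - row.length) = i := by omega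
    rw [this]
    simp [PySem.List.len_eq, hr, List.getD_eq_getElem?_getD]

lemma pv_outerA (nc : Int) (h0 : 0 ≤ nc) (i : Nat) (hi : i < nc.toNat) :
    ∀ (rows : List (List (Option String))) (cols : List String), cols.length = nc.toNat →
    (rows.foldl (pvRowA nc) cols).getD i "" =
      (pvColCells rows i).foldl pvStep (cols.getD i "") := by
  intro rows
  induction rows with
  | nil => intro cols _; simp [pvColCells]
  | cons row rows ih =>
    intro cols hlen
    rw [List.foldl_cons, ih _ (by rw [pvRowA_length nc h0 cols row hlen, hlen])]
    rw [pvRowA_char nc h0 cols row hlen, pv_row_elem pvStep "" nc h0 i hi cols row hlen]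
    unfold pvColCells
    by_cases hr : i < row.length
    · rw [List.filter_cons_of_pos (by simp [PySem.List.len_eq]; omega)]
      have hri : (i : Int) < PySem.List.len row := by simp [PySem.List.len_eq]; omega
      simp [hri, hr]
    · rw [List.filter_cons_of_neg (by simp [PySem.List.len_eq]; omega)]
      have hri : ¬ ((i : Int) < PySem.List.len row) := by simp [PySem.List.len_eq]; omega
      simp [hri, hr]

-- B's gather pass accumulates exactly the column's cells, in row order
lemma pv_outerB (nc : Int) (h0 : 0 ≤ nc) (i : Nat) (hi : i < nc.toNat) :
    ∀ (rows : List (List (Option String))) (st : List (List (Option String))),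
    st.length = nc.toNat →
    (rows.foldl (pvRowB nc) st).getD i [] = st.getD i [] ++ pvColCells rows i := by
  intro rows
  induction rows with
  | nil => intro st _; simp [pvColCells]
  | cons row rows ih =>
    intro st hlen
    rw [List.foldl_cons, ih _ (by rw [pvRowB_length nc h0 st row hlen, hlen])]
    rw [pvRowB_char nc h0 st row hlen,
      pv_row_elem (fun b c => b ++ [c]) [] nc h0 i hi st row hlen]
    unfold pvColCells
    by_cases hr : i < row.length
    · rw [List.filter_cons_of_pos (by simp [PySem.List.len_eq]; omega)]
      have hri : (i : Int) < PySem.List.len row := by simp [PySem.List.len_eq]; omega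
      simp [hri, hr]
    · rw [List.filter_cons_of_neg (by simp [PySem.List.len_eq]; omega)]
      have hri : ¬ ((i : Int) < PySem.List.len row) := by simp [PySem.List.len_eq]; omega
      simp [hri, hr]

lemma pv_outerA_length (nc : Int) (h0 : 0 ≤ nc) (rows : List (List (Option String)))
    (cols : List String) (hlen : cols.length = nc.toNat) :
    (rows.foldl (pvRowA nc) cols).length = nc.toNat := by
  induction rows generalizing cols with
  | nil => simpa using hlen
  | cons row rows ih =>
    rw [List.foldl_cons]
    exact ih _ (by rw [pvRowA_length nc h0 cols row hlen, hlen])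

lemma pv_outerB_length (nc : Int) (h0 : 0 ≤ nc) (rows : List (List (Option String)))
    (st : List (List (Option String))) (hlen : st.length = nc.toNat) :
    (rows.foldl (pvRowB nc) st).length = nc.toNat := by
  induction rows generalizing st with
  | nil => simpa using hlen
  | cons row rows ih =>
    rw [List.foldl_cons]
    exact ih _ (by rw [pvRowB_length nc h0 st row hlen, hlen])

def pvFinStep (i : Nat) (v : String) : String :=
  if v = "" then "Column_" ++ PySem.Int.toStr ((i : Int) + 1) else v

lemma pvFinA_set (cols : List String) (k : Nat) (hk : k < cols.length) :
    pvFinA cols (k : Int) = cols.set k (pvFinStep k (cols.getD k "")) := by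
  simp only [pvFinA, pvFinStep, PySem.List.pyGetD_natCast, PySem.List.pySetD_natCast]
  split_ifs with h1 <;> simp_all [pv_set_getD_self cols k "" hk]

lemma pv_fin_elem (n i : Nat) (hi : i < n) :
    ∀ (k s : Nat) (cols : List String), s + k = n → cols.length = n →
    ((PySem.List.pyRange (s : Int) (n : Int) 1).foldl pvFinA cols).getD i "" =
      if s ≤ i then pvFinStep i (cols.getD i "") else cols.getD i "" := by
  intro k
  induction k with
  | zero =>
    intro s cols hsk hlen
    rw [PySem.List.pyRange_one_eq_nil (by omega)]
    rw [if_neg (by omega)]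
    rfl
  | succ k ih =>
    intro s cols hsk hlen
    have hs : s < cols.length := by omega
    rw [PySem.List.pyRange_one_cons (by omega : (s:Int) < (n:Int)), List.foldl_cons]
    have hc : ((s:Int) + 1) = ((s+1 : Nat) : Int) := by push_cast; ring
    rw [pvFinA_set cols s hs, hc]
    set v := pvFinStep s (cols.getD s "") with hv
    have hlen' : (cols.set s v).length = n := by simpa using hlen
    rw [ih (s+1) _ (by omega) hlen']
    have hgd : ∀ j : Nat, j < cols.length →
        (cols.set s v).getD j "" = if j = s then v else cols.getD j "" := by
      intro j hj
      simp only [List.getD_eq_getElem?_getD, List.getElem?_set]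
      by_cases h : s = j
      · subst h; simp [hs]
      · rw [if_neg h, if_neg (by omega)]
    by_cases h1 : i = s
    · subst h1
      rw [if_neg (by omega), hgd i (by omega), if_pos rfl, if_pos (by omega)]
    · by_cases h2 : s + 1 ≤ i
      · rw [if_pos h2, hgd i (by omega), if_neg h1, if_pos (by omega)]
      · rw [if_neg h2, hgd i (by omega), if_neg h1, if_neg (by omega)]

lemma pv_fin_length : ∀ (l : List Int) (cols : List String),
    (l.foldl pvFinA cols).length = cols.length := by
  intro l
  induction l with
  | nil => intro cols; rfl
  | cons j l ih =>
    intro cols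
    rw [List.foldl_cons, ih]
    unfold pvFinA
    split_ifs <;> simp [PySem.List.length_pySetD]

-- ===== VERDICT (by name: the statement is the Claim_ definition above) =====
theorem merge_header_rows_py_spec : Claim_equal_merge_header_rows_py := by
  intro hr nc _ hpre
  unfold Pre_merge_header_rows_py at hpre
  unfold Spec_merge_header_rows_py
  by_cases h0 : 0 ≤ nc
  case neg =>
    -- num_cols < 0 with every row[:num_cols] empty: both sides return []
    have hall : ∀ row ∈ hr, PySem.List.slice row none (some nc) = [] := by
      rcases hpre with h | h
      · omega
      · intro row hrow
        have := (List.all_eq_true.mp h) row hrow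
        simpa [List.isEmpty_iff] using this
    have hA : ∀ (rows : List (List (Option String))),
        (∀ row ∈ rows, PySem.List.slice row none (some nc) = []) →
        rows.foldl (pvRowA nc) [] = [] := by
      intro rows
      induction rows with
      | nil => intro _; rfl
      | cons row rows ih =>
        intro hs
        rw [List.foldl_cons]
        have h1 : pvRowA nc [] row = [] := by
          unfold pvRowA
          rw [hs row (by simp)]
          rfl
        rw [h1]
        exact ih (fun r hr => hs r (by simp [hr]))
    have hB : ∀ (rows : List (List (Option String))),
        (∀ row ∈ rows, PySem.List.slice row none (some nc) = []) →
        rows.foldl (pvRowB nc) [] = [] := by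
      intro rows
      induction rows with
      | nil => intro _; rfl
      | cons row rows ih =>
        intro hs
        rw [List.foldl_cons]
        have h1 : pvRowB nc [] row = [] := by
          unfold pvRowB
          rw [hs row (by simp)]
          rfl
        rw [h1]
        exact ih (fun r hr => hs r (by simp [hr]))
    have hz : nc.toNat = 0 := by omega
    have hrg : PySem.List.pyRange 0 nc 1 = [] := PySem.List.pyRange_one_eq_nil (by omega)
    rw [pvA_eq, pvB_eq, hz, hrg]
    simp only [List.replicate, List.map_nil]
    rw [hA hr hall, hB hr hall]
    rfl
  set n := nc.toNat with hn
  have hnc : (n : Int) = nc := Int.toNat_of_nonneg h0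
  rw [pvA_eq, pvB_eq]
  set mid := hr.foldl (pvRowA nc) (List.replicate n "") with hmid
  set buckets := hr.foldl (pvRowB nc) ((PySem.List.pyRange 0 nc 1).map (fun _ => [])) with hbk
  have hmlen : mid.length = n := pv_outerA_length nc h0 hr _ (by simp [hn])
  have hblen : buckets.length = n := by
    rw [hbk]
    exact pv_outerB_length nc h0 hr _ (by simp [PySem.List.length_pyRange_one, hn])
  have hAlen : ((PySem.List.pyRange 0 nc 1).foldl pvFinA mid).length = n := by
    rw [pv_fin_length]; exact hmlen
  apply List.ext_getElem (by simp [hAlen, PySem.List.length_enumerate, hblen])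
  intro i hiA hiB
  have hi : i < n := by omega
  have hLd : ∀ (l : List String) (h : i < l.length), l[i] = l.getD i "" :=
    fun l h => by simp [List.getD_eq_getElem?_getD, List.getElem?_eq_getElem h]
  have hrange : PySem.List.pyRange 0 nc 1 = PySem.List.pyRange ((0:Nat):Int) ((n:Nat):Int) 1 := by
    rw [hnc]; norm_num
  have hmg : mid.getD i "" = (pvColCells hr i).foldl pvStep "" := by
    rw [hmid, pv_outerA nc h0 i hi hr (List.replicate n "") (by simp [hn])]
    simp [List.getD_eq_getElem?_getD, hi]
  have hbg : buckets.getD i [] = pvColCells hr i := by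
    rw [hbk, pv_outerB nc h0 i hi hr _ (by simp [PySem.List.length_pyRange_one, hn])]
    have hi2 : i < ((PySem.List.pyRange 0 nc 1).map
        (fun _ => ([] : List (Option String)))).length := by
      simp [PySem.List.length_pyRange_one]; omega
    have hinit : ((PySem.List.pyRange 0 nc 1).map
        (fun _ => ([] : List (Option String)))).getD i [] = [] := by
      simp [List.getD_eq_getElem?_getD, List.getElem?_eq_getElem hi2]
    rw [hinit, List.nil_append]
  rw [List.getElem_map, PySem.List.getElem_enumerate]
  have hbi : buckets[i] = buckets.getD i [] := by
    simp [List.getD_eq_getElem?_getD, List.getElem?_eq_getElem (by omega : i < buckets.length)]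
  conv_lhs => rw [hLd _ hiA]
  rw [hrange, pv_fin_elem n i hi n 0 mid (by omega) hmlen, if_pos (Nat.zero_le i), hmg]
  simp only [hbi, hbg, zero_add]
  rfl
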